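-- pv_equiv track=rewrite | github.com/edenkim9741/Reinforcement-Learning | cleanrl/cleanrl/other_model/chess_minimax.py | get_queen_dir
-- ===== SOURCE A (Python) =====
-- def sign(v):
--     return -1 if v < 0 else (1 if v > 0 else 0)
--
-- def get_queen_dir(diff):
--     dx, dy = diff
--     assert dx == 0 or dy == 0 or abs(dx) == abs(dy)
--     magnitude = max(abs(dx), abs(dy)) - 1
--     counter = 0
--     for x in range(-1, 1 + 1):
--         for y in range(-1, 1 + 1):
--             if x == 0 and y == 0: continue
--             if x == sign(dx) and y == sign(dy): return magnitude, counter
--             counter += 1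
--     return 0, 0
-- ===== SOURCE B (Python) =====
-- def sign(v):
--     return -1 if v < 0 else (1 if v > 0 else 0)
--
-- def get_queen_dir(diff):
--     dx, dy = diff
--     assert dx == 0 or dy == 0 or abs(dx) == abs(dy)
--     sx, sy = sign(dx), sign(dy)
--     if sx == 0 and sy == 0:
--         return 0, 0
--     raw = 3 * (sx + 1) + (sy + 1)
--     counter = raw if raw < 4 else raw - 1
--     return max(abs(dx), abs(dy)) - 1, counter
-- ===== Notes on version B (the rewrite author's own statement) =====
-- stated objective: simpler
-- what changed: replaces A's nested 3x3 scan with early return by a closed-form arithmetic direction index (raw = 3*(sx+1)+(sy+1), skipping the center slot), handling the stationary case with an explicit branch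
import Mathlib
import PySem

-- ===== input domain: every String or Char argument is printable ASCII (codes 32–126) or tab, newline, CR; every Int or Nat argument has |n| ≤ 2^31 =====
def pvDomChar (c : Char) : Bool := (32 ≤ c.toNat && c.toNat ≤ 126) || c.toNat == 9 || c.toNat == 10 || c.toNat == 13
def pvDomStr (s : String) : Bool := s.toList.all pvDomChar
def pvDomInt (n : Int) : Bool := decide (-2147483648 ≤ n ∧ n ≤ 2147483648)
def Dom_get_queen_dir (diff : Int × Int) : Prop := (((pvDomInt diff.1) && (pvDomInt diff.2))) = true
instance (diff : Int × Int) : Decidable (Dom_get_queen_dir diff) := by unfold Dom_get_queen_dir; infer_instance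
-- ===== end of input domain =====

-- B replaces A's nested 3x3 scan with a closed-form direction index; objective: simpler.

-- ===== PORT A =====
def pySign (v : Int) : Int := if v < 0 then -1 else if v > 0 then 1 else 0

-- literal port of A's nested loop: state = (counter, early-return value)
def get_queen_dir (diff : Int × Int) : Int × Int :=
  let dx := diff.1
  let dy := diff.2
  let magnitude := max |dx| |dy| - 1
  let st :=
    (PySem.List.pyRange (-1) 2 1).foldl (fun st x =>
      (PySem.List.pyRange (-1) 2 1).foldl (fun st y =>
        match st with
        | (c, some r) => (c, some r)
        | (c, none) =>
          if x = 0 ∧ y = 0 then (c, none)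
          else if x = pySign dx ∧ y = pySign dy then (c, some (magnitude, c))
          else (c + 1, none)) st) ((0 : Int), (none : Option (Int × Int)))
  match st.2 with
  | some r => r
  | none => (0, 0)

-- ===== PORT B =====
def get_queen_dir_alt (diff : Int × Int) : Int × Int :=
  let dx := diff.1
  let dy := diff.2
  let sx := pySign dx
  let sy := pySign dy
  if sx = 0 ∧ sy = 0 then (0, 0)
  else
    let raw := 3 * (sx + 1) + (sy + 1)
    let counter := if raw < 4 then raw else raw - 1
    (max |dx| |dy| - 1, counter)

-- ===== PRECONDITION & SPEC =====
-- Pre_ excludes exactly the inputs on which A's assert fails (AssertionError).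
def Pre_get_queen_dir (diff : Int × Int) : Prop :=
  diff.1 = 0 ∨ diff.2 = 0 ∨ |diff.1| = |diff.2|
instance (diff : Int × Int) : Decidable (Pre_get_queen_dir diff) := by
  unfold Pre_get_queen_dir; infer_instance

def pvWitness_get_queen_dir : (Int × Int) := (3, -3)

def Spec_get_queen_dir (diff : Int × Int) (out : Int × Int) : Prop := out = get_queen_dir_alt diff
instance (diff : Int × Int) (out : Int × Int) : Decidable (Spec_get_queen_dir diff out) := by unfold Spec_get_queen_dir; infer_instance

-- ===== CLAIM (what is proved, stated in full; the proofs are below) =====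
def Claim_equal_get_queen_dir : Prop := ∀ (diff : Int × Int), Dom_get_queen_dir diff → Pre_get_queen_dir diff → Spec_get_queen_dir diff (get_queen_dir diff)

-- ===== LEMMAS AND PROOFS =====

theorem pySign_cases (v : Int) : (v < 0 ∧ pySign v = -1) ∨ (v = 0 ∧ pySign v = 0) ∨ (0 < v ∧ pySign v = 1) := by
  unfold pySign
  rcases lt_trichotomy v 0 with h | h | h
  · exact Or.inl ⟨h, by simp [h]⟩
  · exact Or.inr (Or.inl ⟨h, by simp [h]⟩)
  · exact Or.inr (Or.inr ⟨h, by simp [h, not_lt.mpr (le_of_lt h)]⟩)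

-- ===== VERDICT (by name: the statement is the Claim_ definition above) =====
theorem get_queen_dir_spec : Claim_equal_get_queen_dir := by
  unfold Claim_equal_get_queen_dir
  rintro ⟨dx, dy⟩ _ _
  unfold Spec_get_queen_dir get_queen_dir get_queen_dir_alt
  have hr : PySem.List.pyRange (-1) 2 1 = [-1, 0, 1] := by decide
  rcases pySign_cases dx with ⟨hx, ex⟩ | ⟨hx, ex⟩ | ⟨hx, ex⟩ <;>
  rcases pySign_cases dy with ⟨hy, ey⟩ | ⟨hy, ey⟩ | ⟨hy, ey⟩ <;>
    simp only [hr, List.foldl] <;> simp [ex, ey] <;> omega
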